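-- pv_equiv track=rewrite | github.com/JimWallace/SPHS-Salary-Analysis | scripts/build_terminal_degree_domains.py | given_name_candidates
-- ===== SOURCE A (Python) =====
-- from typing import Dict, Iterable, List, Optional, Tuple
--
-- GIVEN_NAME_ALIASES = {
--     "DAVID": {"DAVE"},
--     "JAMES": {"JIM"},
--     "CHRISTOPHER": {"CHRIS"},
--     "GEOFFREY": {"GEOFF"},
--     "PHILIP": {"PHIL"},
-- }
--
-- def given_name_candidates(primary_given: str) -> List[str]:
--     if not primary_given:
--         return []
--     candidates = {primary_given}
--     if primary_given in GIVEN_NAME_ALIASES: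
--         candidates |= GIVEN_NAME_ALIASES[primary_given]
--     for formal, aliases in GIVEN_NAME_ALIASES.items():
--         if primary_given in aliases:
--             candidates.add(formal)
--             candidates |= aliases
--     return sorted(candidates)
-- ===== SOURCE B (Python) =====
-- from typing import Dict, List
--
-- GIVEN_NAME_ALIASES = {
--     "DAVID": {"DAVE"},
--     "JAMES": {"JIM"},
--     "CHRISTOPHER": {"CHRIS"},
--     "GEOFFREY": {"GEOFF"},
--     "PHILIP": {"PHIL"},
-- }
--
-- # Built once at load time: every name (formal key or alias) maps to its full sorted group.
-- GROUP_INDEX: Dict[str, List[str]] = {}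
-- for _formal, _aliases in GIVEN_NAME_ALIASES.items():
--     _group = sorted({_formal} | _aliases)
--     for _name in _group:
--         GROUP_INDEX[_name] = _group
--
-- def given_name_candidates(primary_given: str) -> List[str]:
--     if not primary_given:
--         return []
--     return list(GROUP_INDEX.get(primary_given, [primary_given]))
-- ===== Notes on version B (the rewrite author's own statement) =====
-- stated objective: simpler
-- what changed: A rebuilds the candidate set on every call with a dict lookup plus a scan over all alias groups and sorts the result; B builds a module-level index name -> full sorted group once at load time, so each call is a single dict lookup with [primary_given] as the default.
import Mathlib
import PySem

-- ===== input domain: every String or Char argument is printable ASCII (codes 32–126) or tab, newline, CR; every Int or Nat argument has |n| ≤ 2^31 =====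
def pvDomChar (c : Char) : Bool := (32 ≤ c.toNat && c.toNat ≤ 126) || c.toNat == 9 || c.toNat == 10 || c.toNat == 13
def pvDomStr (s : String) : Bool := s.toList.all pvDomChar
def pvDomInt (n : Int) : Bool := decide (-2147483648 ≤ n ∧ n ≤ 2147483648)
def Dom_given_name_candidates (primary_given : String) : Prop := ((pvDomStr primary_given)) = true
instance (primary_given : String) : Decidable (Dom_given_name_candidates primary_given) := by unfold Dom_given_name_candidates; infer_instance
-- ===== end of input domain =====

-- B replaces A's per-call scans of the alias table by a module-level index built once
-- (name -> its full sorted alias group), so each call is a single lookup: simpler call path.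

-- ===== PORT A =====
def GIVEN_NAME_ALIASES : PySem.Dict String (PySem.Set String) :=
  PySem.Dict.ofList [("DAVID", PySem.Set.ofList ["DAVE"]),
   ("JAMES", PySem.Set.ofList ["JIM"]),
   ("CHRISTOPHER", PySem.Set.ofList ["CHRIS"]),
   ("GEOFFREY", PySem.Set.ofList ["GEOFF"]),
   ("PHILIP", PySem.Set.ofList ["PHIL"])]

def given_name_candidates (primary_given : String) : List String :=
  if primary_given = "" then []
  else
    let candidates : PySem.Set String := PySem.Set.ofList [primary_given]
    let candidates : PySem.Set String :=
      match PySem.Dict.get? GIVEN_NAME_ALIASES primary_given with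
      | some al => PySem.Set.union candidates al
      | none => candidates
    let candidates : PySem.Set String :=
      GIVEN_NAME_ALIASES.items.foldl
        (fun cand fa =>
          if PySem.Set.contains fa.2 primary_given then
            PySem.Set.union (PySem.Set.add cand fa.1) fa.2
          else cand)
        candidates
    PySem.List.sorted candidates (fun x => x) false

-- ===== PORT B =====
-- built once at load time, as in Source B: every name in a group maps to the sorted group
def GROUP_INDEX : PySem.Dict String (List String) :=
  GIVEN_NAME_ALIASES.items.foldl
    (fun idx fa =>
      let group := PySem.List.sorted
        (PySem.Set.union (PySem.Set.ofList [fa.1]) fa.2) (fun x => x) false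
      group.foldl (fun idx name => PySem.Dict.insert idx name group) idx)
    PySem.Dict.empty

def given_name_candidates_alt (primary_given : String) : List String :=
  if primary_given = "" then []
  else (PySem.Dict.get? GROUP_INDEX primary_given).getD [primary_given]

-- ===== PRECONDITION & SPEC =====
def Spec_given_name_candidates (primary_given : String) (out : List String) : Prop := out = given_name_candidates_alt primary_given
instance (primary_given : String) (out : List String) : Decidable (Spec_given_name_candidates primary_given out) := by unfold Spec_given_name_candidates; infer_instance

-- ===== CLAIM (what is proved, stated in full; the proofs are below) =====
def Claim_equal_given_name_candidates : Prop := ∀ (primary_given : String), Dom_given_name_candidates primary_given → Spec_given_name_candidates primary_given (given_name_candidates primary_given)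

-- ===== LEMMAS AND PROOFS =====

lemma sorted_swap (a b : String) (h : a.toList < b.toList) :
    PySem.List.sorted [b, a] (fun x => x) false = [a, b] := by
  apply PySem.List.sorted_eq_of_perm_of_pairwise_lt
  · exact List.Perm.swap b a []
  · simp [h]

lemma sorted_keep (a b : String) (h : a.toList < b.toList) :
    PySem.List.sorted [a, b] (fun x => x) false = [a, b] := by
  apply PySem.List.sorted_eq_of_perm_of_pairwise_lt
  · exact List.Perm.refl _
  · simp [h]

lemma sorted_single (p : String) : PySem.List.sorted [p] (fun x => x) false = [p] := rfl

lemma ALIASES_eq : GIVEN_NAME_ALIASES = PySem.Dict.mk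
  [("DAVID", ["DAVE"]), ("JAMES", ["JIM"]), ("CHRISTOPHER", ["CHRIS"]),
   ("GEOFFREY", ["GEOFF"]), ("PHILIP", ["PHIL"])] := by decide

lemma GROUP_INDEX_eq : GROUP_INDEX = PySem.Dict.mk
  [("DAVE", ["DAVE", "DAVID"]), ("DAVID", ["DAVE", "DAVID"]),
   ("JAMES", ["JAMES", "JIM"]), ("JIM", ["JAMES", "JIM"]),
   ("CHRIS", ["CHRIS", "CHRISTOPHER"]), ("CHRISTOPHER", ["CHRIS", "CHRISTOPHER"]),
   ("GEOFF", ["GEOFF", "GEOFFREY"]), ("GEOFFREY", ["GEOFF", "GEOFFREY"]),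
   ("PHIL", ["PHIL", "PHILIP"]), ("PHILIP", ["PHIL", "PHILIP"])] := by
  unfold GROUP_INDEX
  rw [show GIVEN_NAME_ALIASES.items =
    [("DAVID", ["DAVE"]), ("JAMES", ["JIM"]), ("CHRISTOPHER", ["CHRIS"]),
     ("GEOFFREY", ["GEOFF"]), ("PHILIP", ["PHIL"])] from rfl]
  simp only [List.foldl]
  rw [show (PySem.Set.ofList ["DAVID"]).union ["DAVE"] = ["DAVID","DAVE"] from rfl,
      show (PySem.Set.ofList ["JAMES"]).union ["JIM"] = ["JAMES","JIM"] from rfl,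
      show (PySem.Set.ofList ["CHRISTOPHER"]).union ["CHRIS"] = ["CHRISTOPHER","CHRIS"] from rfl,
      show (PySem.Set.ofList ["GEOFFREY"]).union ["GEOFF"] = ["GEOFFREY","GEOFF"] from rfl,
      show (PySem.Set.ofList ["PHILIP"]).union ["PHIL"] = ["PHILIP","PHIL"] from rfl,
      sorted_swap "DAVE" "DAVID" (by decide),
      sorted_keep "JAMES" "JIM" (by decide),
      sorted_swap "CHRIS" "CHRISTOPHER" (by decide),
      sorted_swap "GEOFF" "GEOFFREY" (by decide),
      sorted_swap "PHIL" "PHILIP" (by decide)]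
  rfl

-- ===== VERDICT (by name: the statement is the Claim_ definition above) =====
theorem given_name_candidates_spec : Claim_equal_given_name_candidates := by
  intro p _
  unfold Spec_given_name_candidates
  by_cases h0 : p = ""
  · simp [given_name_candidates, given_name_candidates_alt, h0]
  by_cases h1 : p = "DAVID"
  · subst h1
    rw [show given_name_candidates "DAVID" = PySem.List.sorted ["DAVID","DAVE"] (fun x => x) false from rfl,
        sorted_swap "DAVE" "DAVID" (by decide)]
    simp only [given_name_candidates_alt, GROUP_INDEX_eq]
    rfl
  by_cases h2 : p = "DAVE"
  · subst h2
    rw [show given_name_candidates "DAVE" = PySem.List.sorted ["DAVE","DAVID"] (fun x => x) false from rfl,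
        sorted_keep "DAVE" "DAVID" (by decide)]
    simp only [given_name_candidates_alt, GROUP_INDEX_eq]
    rfl
  by_cases h3 : p = "JAMES"
  · subst h3
    rw [show given_name_candidates "JAMES" = PySem.List.sorted ["JAMES","JIM"] (fun x => x) false from rfl,
        sorted_keep "JAMES" "JIM" (by decide)]
    simp only [given_name_candidates_alt, GROUP_INDEX_eq]
    rfl
  by_cases h4 : p = "JIM"
  · subst h4
    rw [show given_name_candidates "JIM" = PySem.List.sorted ["JIM","JAMES"] (fun x => x) false from rfl,
        sorted_swap "JAMES" "JIM" (by decide)]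
    simp only [given_name_candidates_alt, GROUP_INDEX_eq]
    rfl
  by_cases h5 : p = "CHRISTOPHER"
  · subst h5
    rw [show given_name_candidates "CHRISTOPHER" = PySem.List.sorted ["CHRISTOPHER","CHRIS"] (fun x => x) false from rfl,
        sorted_swap "CHRIS" "CHRISTOPHER" (by decide)]
    simp only [given_name_candidates_alt, GROUP_INDEX_eq]
    rfl
  by_cases h6 : p = "CHRIS"
  · subst h6
    rw [show given_name_candidates "CHRIS" = PySem.List.sorted ["CHRIS","CHRISTOPHER"] (fun x => x) false from rfl,
        sorted_keep "CHRIS" "CHRISTOPHER" (by decide)]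
    simp only [given_name_candidates_alt, GROUP_INDEX_eq]
    rfl
  by_cases h7 : p = "GEOFFREY"
  · subst h7
    rw [show given_name_candidates "GEOFFREY" = PySem.List.sorted ["GEOFFREY","GEOFF"] (fun x => x) false from rfl,
        sorted_swap "GEOFF" "GEOFFREY" (by decide)]
    simp only [given_name_candidates_alt, GROUP_INDEX_eq]
    rfl
  by_cases h8 : p = "GEOFF"
  · subst h8
    rw [show given_name_candidates "GEOFF" = PySem.List.sorted ["GEOFF","GEOFFREY"] (fun x => x) false from rfl,
        sorted_keep "GEOFF" "GEOFFREY" (by decide)]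
    simp only [given_name_candidates_alt, GROUP_INDEX_eq]
    rfl
  by_cases h9 : p = "PHILIP"
  · subst h9
    rw [show given_name_candidates "PHILIP" = PySem.List.sorted ["PHILIP","PHIL"] (fun x => x) false from rfl,
        sorted_swap "PHIL" "PHILIP" (by decide)]
    simp only [given_name_candidates_alt, GROUP_INDEX_eq]
    rfl
  by_cases h10 : p = "PHIL"
  · subst h10
    rw [show given_name_candidates "PHIL" = PySem.List.sorted ["PHIL","PHILIP"] (fun x => x) false from rfl,
        sorted_keep "PHIL" "PHILIP" (by decide)]
    simp only [given_name_candidates_alt, GROUP_INDEX_eq]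
    rfl
  simp only [given_name_candidates, given_name_candidates_alt, ALIASES_eq, GROUP_INDEX_eq,
    if_neg h0]
  rw [show (PySem.Dict.mk [("DAVID", ["DAVE"]), ("JAMES", ["JIM"]),
      ("CHRISTOPHER", ["CHRIS"]), ("GEOFFREY", ["GEOFF"]),
      ("PHILIP", ["PHIL"])]).get? p = none by
    simp [PySem.Dict.get?, Ne.symm h1, Ne.symm h3, Ne.symm h5, Ne.symm h7, Ne.symm h9]]
  simp [PySem.Dict.get?, List.foldl, PySem.Set.ofList, PySem.Set.add,
    PySem.Set.contains, sorted_single,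
    Ne.symm h1, Ne.symm h2, Ne.symm h3, Ne.symm h4, Ne.symm h5, Ne.symm h6, Ne.symm h7,
    Ne.symm h8, Ne.symm h9, Ne.symm h10, h2, h4, h6, h8, h10]
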